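-- pv_equiv track=rewrite | github.com/pankaj28843/agentic-ai-playground | packages/agent_toolkit/src/agent_toolkit/resources/loader.py | _is_valid_skill_name
-- ===== SOURCE A (Python) =====
-- def _is_valid_skill_name(name: str) -> bool:
--     if not name:
--         return False
--     if name.startswith("-") or name.endswith("-"):
--         return False
--     if "--" in name:
--         return False
--     return all(ch.islower() or ch.isdigit() or ch == "-" for ch in name)
-- ===== SOURCE B (Python) =====
-- def _is_valid_skill_name(name: str) -> bool:
--     # single left-to-right scan tracking the previous character;
--     # prev starts as '-' so a leading '-' (and the empty string) is rejected for free
--     prev = "-"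
--     for ch in name:
--         if ch == "-":
--             if prev == "-":
--                 return False
--         elif not (ch.islower() or ch.isdigit()):
--             return False
--         prev = ch
--     return prev != "-"
-- ===== Notes on version B (the rewrite author's own statement) =====
-- stated objective: alternative
-- what changed: The four separate checks of A (emptiness, leading/trailing dash, double-dash substring scan, all()-pass over the characters) are fused into one left-to-right scan that tracks the previous character, initialised to a dash so that leading dashes and the empty string are rejected by the same rule.
import Mathlib
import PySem

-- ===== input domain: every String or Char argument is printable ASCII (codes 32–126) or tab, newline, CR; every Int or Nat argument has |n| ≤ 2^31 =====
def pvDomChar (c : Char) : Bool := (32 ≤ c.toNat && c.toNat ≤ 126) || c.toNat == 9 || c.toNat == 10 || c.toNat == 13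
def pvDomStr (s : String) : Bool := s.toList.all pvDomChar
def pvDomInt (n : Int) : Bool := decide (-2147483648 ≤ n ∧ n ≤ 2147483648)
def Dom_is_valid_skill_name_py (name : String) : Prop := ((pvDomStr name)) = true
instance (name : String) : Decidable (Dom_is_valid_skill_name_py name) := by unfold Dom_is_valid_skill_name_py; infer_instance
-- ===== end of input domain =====

-- B fuses A's four separate checks into one scan with a tracked previous character (objective: alternative, same cost).

-- ===== PORT A =====
def is_valid_skill_name_py (name : String) : Bool :=
  if name.toList.isEmpty then false
  else if PySem.Str.startswith name "-" || PySem.Str.endswith name "-" then false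
  else if PySem.Str.isIn "--" name then false
  else name.toList.all (fun ch => PySem.Chars.islower ch || PySem.Chars.isdigit ch || ch == '-')

-- ===== PORT B =====
def pvGoodChar (ch : Char) : Bool := PySem.Chars.islower ch || PySem.Chars.isdigit ch

-- the for-loop of Source B with early returns, prev carried as an argument
def pvScan : Char → List Char → Bool
  | prev, [] => prev != '-'
  | prev, ch :: rest =>
    if ch == '-' then
      if prev == '-' then false else pvScan ch rest
    else if pvGoodChar ch then pvScan ch rest
    else false

def is_valid_skill_name_py_alt (name : String) : Bool := pvScan '-' name.toList

-- ===== PRECONDITION & SPEC =====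
def Spec_is_valid_skill_name_py (name : String) (out : Bool) : Prop := out = is_valid_skill_name_py_alt name
instance (name : String) (out : Bool) : Decidable (Spec_is_valid_skill_name_py name out) := by unfold Spec_is_valid_skill_name_py; infer_instance

-- ===== CLAIM (what is proved, stated in full; the proofs are below) =====
def Claim_equal_is_valid_skill_name_py : Prop := ∀ (name : String), Dom_is_valid_skill_name_py name → Spec_is_valid_skill_name_py name (is_valid_skill_name_py name)

-- ===== LEMMAS AND PROOFS =====

-- adjacent "--" detector, used only to characterise pvScan
def pvHasDD : List Char → Bool
  | a :: b :: rest => (a == '-' && b == '-') || pvHasDD (b :: rest)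
  | _ => false

lemma pvGetLast?_cons (a : Char) (l : List Char) (d : Char) :
    (a :: l).getLast?.getD d = l.getLastD a := by
  simp [List.getLast?_cons]

lemma pvScan_eq (cs : List Char) : ∀ prev,
    pvScan prev cs =
      (cs.all (fun ch => pvGoodChar ch || ch == '-') && !pvHasDD (prev :: cs)
        && (cs.getLastD prev != '-')) := by
  induction cs with
  | nil => intro prev; simp [pvScan, pvHasDD]
  | cons ch rest ih =>
    intro prev
    by_cases hch : ch = '-'
    · subst hch
      by_cases hprev : prev = '-'
      · subst hprev; simp [pvScan, pvHasDD]
      · have hg : pvGoodChar '-' = false := by decide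
        have h1 : (prev == '-') = false := beq_eq_false_iff_ne.mpr hprev
        simp [pvScan, pvHasDD, ih, hg, h1, pvGetLast?_cons]
    · by_cases hg : pvGoodChar ch = true
      · have h1 : (ch == '-') = false := beq_eq_false_iff_ne.mpr hch
        simp [pvScan, pvHasDD, hg, ih, h1, pvGetLast?_cons]
      · simp only [Bool.not_eq_true] at hg
        simp [pvScan, pvHasDD, hch, hg]

lemma pvHasDD_iff : ∀ cs : List Char, pvHasDD cs = true ↔ ['-', '-'] <:+: cs := by
  intro cs
  induction cs with
  | nil => simp [pvHasDD]
  | cons a tail ih =>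
    cases tail with
    | nil =>
      constructor
      · intro h; simp [pvHasDD] at h
      · intro h
        have := h.length_le
        simp at this
    | cons b rest =>
      rw [List.infix_cons_iff]
      constructor
      · intro h
        simp only [pvHasDD, Bool.or_eq_true, Bool.and_eq_true, beq_iff_eq] at h
        rcases h with ⟨ha, hb⟩ | h
        · exact Or.inl (by simp [ha, hb, List.cons_prefix_cons])
        · exact Or.inr (ih.mp h)
      · intro h
        rcases h with h | h
        · simp only [List.cons_prefix_cons] at h
          obtain ⟨ha, hb, -⟩ := h
          simp [pvHasDD, ← ha, ← hb]
        · simp [pvHasDD, ih.mpr h]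

lemma pvSuffix_singleton (c : Char) : ∀ (cs : List Char) (prev : Char),
    [c] <:+ prev :: cs ↔ cs.getLastD prev = c := by
  intro cs
  induction cs with
  | nil => intro prev; simp [List.suffix_cons_iff, eq_comm]
  | cons b rest ih =>
    intro prev
    rw [List.suffix_cons_iff]
    simp only [List.getLastD_cons]
    constructor
    · intro h
      rcases h with h | h
      · simp at h
      · exact (ih b).mp h
    · intro h; exact Or.inr ((ih b).mpr h)

lemma pvMain_list (cs : List Char) :
    (if cs.isEmpty then false
      else if PySem.Chars.startswith cs ['-'] || PySem.Chars.endswith cs ['-'] then false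
      else if PySem.Chars.isIn ['-', '-'] cs then false
      else cs.all (fun ch => PySem.Chars.islower ch || PySem.Chars.isdigit ch || ch == '-'))
      = pvScan '-' cs := by
  cases cs with
  | nil => simp [pvScan]
  | cons c rest =>
    rw [pvScan_eq]
    have hgf : (fun ch => pvGoodChar ch || ch == '-')
        = (fun ch => PySem.Chars.islower ch || PySem.Chars.isdigit ch || ch == '-') := by
      funext ch; simp [pvGoodChar, Bool.or_assoc]
    rw [hgf]
    have hstart : PySem.Chars.startswith (c :: rest) ['-'] = true ↔ c = '-' := by
      rw [PySem.Chars.startswith_iff, List.cons_prefix_cons]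
      simp [eq_comm]
    have hend : PySem.Chars.endswith (c :: rest) ['-'] = true ↔ rest.getLastD c = '-' := by
      rw [PySem.Chars.endswith_iff]
      exact pvSuffix_singleton '-' rest c
    have hdd : pvHasDD ('-' :: c :: rest) = true ↔ (c = '-' ∨ ['-', '-'] <:+: c :: rest) := by
      simp [pvHasDD, pvHasDD_iff]
    by_cases hs : c = '-'
    · have bs : PySem.Chars.startswith (c :: rest) ['-'] = true := hstart.mpr hs
      have bd : pvHasDD ('-' :: c :: rest) = true := hdd.mpr (Or.inl hs)
      simp [bs, bd]
    · have bs : PySem.Chars.startswith (c :: rest) ['-'] = false :=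
        Bool.eq_false_iff.mpr (fun h => hs (hstart.mp h))
      by_cases he : rest.getLastD c = '-'
      · have be : PySem.Chars.endswith (c :: rest) ['-'] = true := hend.mpr he
        simp [bs, be, ← List.getLastD_eq_getLast?, List.getLastD_cons, he]
      · have be : PySem.Chars.endswith (c :: rest) ['-'] = false :=
          Bool.eq_false_iff.mpr (fun h => he (hend.mp h))
        by_cases hi : ['-', '-'] <:+: c :: rest
        · have bi : PySem.Chars.isIn ['-', '-'] (c :: rest) = true := by
            rw [PySem.Chars.isIn_iff_infix]; exact hi
          have bd : pvHasDD ('-' :: c :: rest) = true := hdd.mpr (Or.inr hi)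
          simp [bs, be, bi, bd]
        · have bi : PySem.Chars.isIn ['-', '-'] (c :: rest) = false := by
            rw [Bool.eq_false_iff, Ne, PySem.Chars.isIn_iff_infix]; exact hi
          have bd : pvHasDD ('-' :: c :: rest) = false :=
            Bool.eq_false_iff.mpr (fun h => (hdd.mp h).elim hs hi)
          simp [bs, be, bi, bd, ← List.getLastD_eq_getLast?, List.getLastD_cons, he]

-- ===== VERDICT (by name: the statement is the Claim_ definition above) =====
theorem is_valid_skill_name_py_spec : Claim_equal_is_valid_skill_name_py := by
  intro name _
  unfold Spec_is_valid_skill_name_py is_valid_skill_name_py is_valid_skill_name_py_alt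
  have h1 : ("-" : String).toList = ['-'] := by decide
  have h2 : ("--" : String).toList = ['-', '-'] := by decide
  rw [show PySem.Str.startswith name "-" = PySem.Chars.startswith name.toList ['-'] by
        rw [← h1]; simp [PySem.Str.startswith_eq],
      show PySem.Str.endswith name "-" = PySem.Chars.endswith name.toList ['-'] by
        rw [← h1]; simp [PySem.Str.endswith_eq],
      show PySem.Str.isIn "--" name = PySem.Chars.isIn ['-', '-'] name.toList by
        rw [← h2]; simp [PySem.Str.isIn_eq]]
  exact pvMain_list name.toList
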